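-- pv_equiv track=rewrite | github.com/valmir-filho/python | codewars/files-100-to-199/challenge125.py | encode_cd
-- ===== SOURCE A (Python) =====
-- def encode_cd(n):
--     if not (0 <= n <= 255):
--         raise ValueError("Input must be within the range 0..255")
--
--     binary_rep = format(n, '08b')[::-1]
--     result = ['P']
--
--     for bit in binary_rep:
--         if bit == '1':
--             if result[-1] == 'P':
--                 result.append('L')
--             else:
--                 result.append('P')
--         else:
--             result.append(result[-1])
--
--     return ''.join(result)
-- ===== SOURCE B (Python) =====
-- def encode_cd(n):
--     if not (0 <= n <= 255):
--         raise ValueError("Input must be within the range 0..255")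
--     binary = format(n, '08b')[::-1]
--     return ''.join('P' if binary[:j].count('1') % 2 == 0 else 'L' for j in range(9))
-- ===== Notes on version B (the rewrite author's own statement) =====
-- stated objective: alternative
-- what changed: replaces the stateful toggle loop (each output char depends on the previous one appended to a list) by an independent per-position formula: output char j is 'P' iff the popcount of the first j LSB-first bits is even, computed with a prefix count inside a join over range(9).
import Mathlib
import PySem

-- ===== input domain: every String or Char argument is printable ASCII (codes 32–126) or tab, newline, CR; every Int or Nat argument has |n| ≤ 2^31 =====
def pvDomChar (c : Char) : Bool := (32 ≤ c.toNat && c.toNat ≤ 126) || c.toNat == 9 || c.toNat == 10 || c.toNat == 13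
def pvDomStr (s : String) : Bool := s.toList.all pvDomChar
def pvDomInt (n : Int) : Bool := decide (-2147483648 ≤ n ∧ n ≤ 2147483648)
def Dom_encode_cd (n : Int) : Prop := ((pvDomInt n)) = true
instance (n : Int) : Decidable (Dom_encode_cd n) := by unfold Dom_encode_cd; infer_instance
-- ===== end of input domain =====

-- B computes each output character independently from a prefix popcount parity instead of
-- threading a last-character toggle state through an accumulating list (objective: alternative).

-- ===== PORT A =====
-- format(m, '08b') for 0 ≤ m < 256: 8 binary digit chars, MSB first
def pvFmt8 (m : Nat) : List Char :=
  (List.range 8).map (fun i => if m / 2 ^ (7 - i) % 2 = 1 then '1' else '0')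

def encode_cd (n : Int) : String :=
  if 0 ≤ n ∧ n ≤ 255 then
    -- binary_rep = format(n,'08b')[::-1]
    let binary_rep := (pvFmt8 n.toNat).reverse
    let result :=
      binary_rep.foldl (fun res bit =>
        if bit = '1' then
          if res.getLastD 'P' = 'P' then res ++ ['L'] else res ++ ['P']
        else res ++ [res.getLastD 'P']) ['P']
    String.ofList result
  else ""  -- Python raises ValueError here; excluded by Pre_encode_cd

-- ===== PORT B =====
def encode_cd_alt (n : Int) : String :=
  if 0 ≤ n ∧ n ≤ 255 then
    let binary := (pvFmt8 n.toNat).reverse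
    String.ofList ((List.range 9).map (fun j =>
      if ((binary.take j).count '1') % 2 = 0 then 'P' else 'L'))
  else ""  -- Python raises ValueError here; excluded by Pre_encode_cd

-- ===== PRECONDITION & SPEC =====
-- A raises ValueError unless 0 <= n <= 255
def Pre_encode_cd (n : Int) : Prop := 0 ≤ n ∧ n ≤ 255
instance (n : Int) : Decidable (Pre_encode_cd n) := by unfold Pre_encode_cd; infer_instance
def pvWitness_encode_cd : Int := (5)

def Spec_encode_cd (n : Int) (out : String) : Prop := out = encode_cd_alt n
instance (n : Int) (out : String) : Decidable (Spec_encode_cd n out) := by unfold Spec_encode_cd; infer_instance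

-- ===== CLAIM (what is proved, stated in full; the proofs are below) =====
def Claim_equal_encode_cd : Prop := ∀ (n : Int), Dom_encode_cd n → Pre_encode_cd n → Spec_encode_cd n (encode_cd n)

-- ===== LEMMAS AND PROOFS =====
set_option maxRecDepth 8192 in
set_option maxHeartbeats 1000000 in
theorem encode_cd_key : ∀ m : Nat, m < 256 → encode_cd (m : Int) = encode_cd_alt (m : Int) := by
  decide

-- ===== VERDICT (by name: the statement is the Claim_ definition above) =====
theorem encode_cd_spec : Claim_equal_encode_cd := by
  intro n _ hpre
  unfold Spec_encode_cd
  obtain ⟨h0, h255⟩ := hpre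
  have hn : n = (n.toNat : Int) := (Int.toNat_of_nonneg h0).symm
  have hlt : n.toNat < 256 := by omega
  rw [hn]
  exact encode_cd_key n.toNat hlt
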